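-- pv_equiv track=rewrite | github.com/ifyjakande/pullus-logistics-tracker | logistics_dashboard_updater.py | _a1_to_grid_range
-- ===== SOURCE A (Python) =====
-- def _a1_to_grid_range(a1_notation):
--     """Convert A1 notation to zero-based grid coordinates."""
--     col_str = ""
--     row_str = ""
--
--     for char in a1_notation:
--         if char.isalpha():
--             col_str += char
--         else:
--             row_str += char
--
--     # Convert column letters to number (A=0, B=1, etc.)
--     col = 0
--     for i, char in enumerate(reversed(col_str.upper())):
--         col += (ord(char) - ord('A') + 1) * (26 ** i)
--     col -= 1  # Convert to zero-based
--
--     # Convert row to zero-based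
--     row = int(row_str) - 1 if row_str else 0
--
--     return col, row
-- ===== SOURCE B (Python) =====
-- _B26 = "0123456789abcdefghijklmnop"
--
-- def _a1_to_grid_range(a1_notation):
--     """Convert A1 notation to zero-based grid coordinates."""
--     letters = "".join(c for c in a1_notation if c.isalpha())
--     row_str = "".join(c for c in a1_notation if not c.isalpha())
--
--     # Bijective base-26 via ordinary base-26: map each letter to its 0-based
--     # base-26 digit, let int(?, 26) do the positional conversion, and add the
--     # closed-form repunit correction (26**k - 1) // 25 = 26**(k-1)+...+26+1.
--     k = len(letters)
--     mapped = "".join(_B26[ord(c.upper()) - ord('A')] for c in letters)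
--     base = int(mapped, 26) if mapped else 0
--     col = base + (26 ** k - 1) // 25 - 1
--
--     row = int(row_str) - 1 if row_str else 0
--     return col, row
-- ===== Notes on version B (the rewrite author's own statement) =====
-- stated objective: faster
-- what changed: Column value is computed by reducing bijective base-26 to ordinary base-26 — letters translated to base-26 digit characters, converted positionally by int(mapped, 26), plus the closed-form repunit correction (26**k - 1)//25 — instead of A's reversed enumerate loop summing (letter+1)*26**i; the character split uses joined generator filters instead of A's quadratic string-+= accumulation.
import Mathlib
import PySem

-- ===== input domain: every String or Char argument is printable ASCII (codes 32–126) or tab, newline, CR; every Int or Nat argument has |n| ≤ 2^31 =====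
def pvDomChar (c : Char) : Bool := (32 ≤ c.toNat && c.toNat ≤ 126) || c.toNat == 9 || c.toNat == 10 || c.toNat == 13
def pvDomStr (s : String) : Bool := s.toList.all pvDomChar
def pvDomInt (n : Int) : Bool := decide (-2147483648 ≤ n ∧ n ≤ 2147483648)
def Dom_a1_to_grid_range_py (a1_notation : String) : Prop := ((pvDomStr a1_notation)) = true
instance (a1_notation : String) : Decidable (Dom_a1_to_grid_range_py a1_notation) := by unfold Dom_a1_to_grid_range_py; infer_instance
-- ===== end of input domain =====

-- B replaces A's bijective base-26 loop (reversed enumerate with 26**i powers) by a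
-- reduction to ordinary base-26: translate letters to digits, convert positionally,
-- and add the closed-form repunit correction (26^k - 1) // 25 (objective: alternative).

-- ===== PORT A =====
def a1_to_grid_range_py (a1_notation : String) : Int × Int :=
  -- for char in a1_notation: split into col_str / row_str
  let split := a1_notation.toList.foldl
    (fun (p : List Char × List Char) c =>
      if PySem.Chars.isalpha c then (p.1 ++ [c], p.2) else (p.1, p.2 ++ [c]))
    ([], [])
  let col_str := split.1
  let row_str := split.2
  -- for i, char in enumerate(reversed(col_str.upper())): col += (ord(char)-ord('A')+1) * 26**i
  let col : Int := (PySem.List.enumerate (PySem.Chars.upper col_str).reverse).foldl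
    (fun (col : Int) (ic : Int × Char) =>
      col + ((ic.2.toNat : Int) - 65 + 1) * 26 ^ ic.1.toNat) 0
  let col := col - 1
  -- row = int(row_str) - 1 if row_str else 0   (int() raising is excluded by Pre_)
  let row : Int := if row_str ≠ [] then (PySem.Int.ofChars? row_str).getD 1 - 1 else 0
  (col, row)

-- ===== PORT B =====
def a1_to_grid_range_py_alt (a1_notation : String) : Int × Int :=
  let letters := a1_notation.toList.filter (fun c => PySem.Chars.isalpha c)
  let row_str := a1_notation.toList.filter (fun c => !PySem.Chars.isalpha c)
  let k := letters.length
  -- mapped = letters translated to base-26 digit chars; 'int(mapped, 26) if mapped else 0'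
  -- ported as the standard positional base-26 parse of those digits (exact: each mapped
  -- char encodes the value ord(c.upper()) - ord('A'), and the empty parse is 0)
  let base : Int := letters.foldl
    (fun (a : Int) c => a * 26 + (((PySem.Chars.upperChar c).toNat : Int) - 65)) 0
  let col : Int := base + PySem.Int.floordiv (26 ^ k - 1) 25 - 1
  let row : Int := if row_str ≠ [] then (PySem.Int.ofChars? row_str).getD 1 - 1 else 0
  (col, row)

-- ===== PRECONDITION & SPEC =====
-- Pre_ excludes inputs whose non-alpha characters do not form a valid integer literal,
-- on which both A and B raise ValueError in int().
def Pre_a1_to_grid_range_py (a1_notation : String) : Prop :=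
  let rs := a1_notation.toList.filter (fun c => !PySem.Chars.isalpha c)
  rs = [] ∨ (PySem.Int.ofChars? rs).isSome = true
instance (a1_notation : String) : Decidable (Pre_a1_to_grid_range_py a1_notation) := by
  unfold Pre_a1_to_grid_range_py; infer_instance
def pvWitness_a1_to_grid_range_py : String := "AA10"

def Spec_a1_to_grid_range_py (a1_notation : String) (out : Int × Int) : Prop :=
  out = a1_to_grid_range_py_alt a1_notation
instance (a1_notation : String) (out : Int × Int) : Decidable (Spec_a1_to_grid_range_py a1_notation out) := by
  unfold Spec_a1_to_grid_range_py; infer_instance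

-- ===== CLAIM (what is proved, stated in full; the proofs are below) =====
def Claim_equal_a1_to_grid_range_py : Prop := ∀ (a1_notation : String), Dom_a1_to_grid_range_py a1_notation → Pre_a1_to_grid_range_py a1_notation → Spec_a1_to_grid_range_py a1_notation (a1_to_grid_range_py a1_notation)

-- ===== LEMMAS AND PROOFS =====

-- A's splitting fold computes the two filters.
theorem pvSplit_eq (l a b : List Char) :
    l.foldl (fun (p : List Char × List Char) c =>
        if PySem.Chars.isalpha c then (p.1 ++ [c], p.2) else (p.1, p.2 ++ [c])) (a, b)
      = (a ++ l.filter (fun c => PySem.Chars.isalpha c),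
         b ++ l.filter (fun c => !PySem.Chars.isalpha c)) := by
  induction l generalizing a b with
  | nil => simp
  | cons c t ih =>
    by_cases h : PySem.Chars.isalpha c = true <;> simp [h, ih]

-- the positional value sum A computes over the reversed column string
def pvSumPow (val : Char → Int) : List Char → Nat → Int
  | [], _ => 0
  | c :: t, s => val c * 26 ^ s + pvSumPow val t (s + 1)

theorem pvSumPow_succ (val : Char → Int) (l : List Char) (s : Nat) :
    pvSumPow val l (s + 1) = 26 * pvSumPow val l s := by
  induction l generalizing s with
  | nil => simp [pvSumPow]
  | cons c t ih => simp [pvSumPow, ih, pow_succ]; ring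

theorem pvEnumFold (val : Char → Int) (r : List Char) (s : Nat) (acc : Int) :
    (PySem.List.enumerate r (s : Int)).foldl
        (fun (a : Int) (ic : Int × Char) => a + val ic.2 * 26 ^ ic.1.toNat) acc
      = acc + pvSumPow val r s := by
  induction r generalizing s acc with
  | nil => simp [PySem.List.enumerate_nil, pvSumPow]
  | cons c t ih =>
    have h1 : (s : Int) + 1 = ((s + 1 : Nat) : Int) := by push_cast; ring
    rw [PySem.List.enumerate_cons, List.foldl_cons, h1, ih]
    simp only [pvSumPow, pvSumPow_succ, Int.toNat_natCast]
    ring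

-- Horner's forward fold equals the reversed positional sum.
theorem pvHorner (val : Char → Int) (l : List Char) :
    l.foldl (fun (a : Int) c => a * 26 + val c) 0 = pvSumPow val l.reverse 0 := by
  induction l using List.reverseRecOn with
  | nil => simp [pvSumPow]
  | append_singleton t c ih =>
    simp [List.foldl_append, ih, pvSumPow, pvSumPow_succ]
    ring

theorem pvSumPow_map (val : Char → Int) (g : Char → Char) (l : List Char) (s : Nat) :
    pvSumPow val (l.map g) s = pvSumPow (fun c => val (g c)) l s := by
  induction l generalizing s with
  | nil => rfl
  | cons c t ih => simp [pvSumPow, ih]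

-- the base-26 repunit 26^(k-1) + … + 26 + 1
def pvRep : Nat → Int
  | 0 => 0
  | n + 1 => 26 * pvRep n + 1

-- shifting every digit up by one adds the (shifted) repunit
theorem pvSumPow_shift (val : Char → Int) (l : List Char) (s : Nat) :
    pvSumPow (fun c => val c + 1) l s = pvSumPow val l s + 26 ^ s * pvRep l.length := by
  induction l generalizing s with
  | nil => simp [pvSumPow, pvRep]
  | cons c t ih =>
    simp only [pvSumPow, ih, List.length_cons, pvRep, pow_succ]
    ring

theorem pvRep_mul (k : Nat) : 25 * pvRep k + 1 = 26 ^ k := by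
  induction k with
  | zero => simp [pvRep]
  | succ n ih => simp only [pvRep, pow_succ]; rw [← ih]; ring

theorem pvRep_floordiv (k : Nat) : PySem.Int.floordiv (26 ^ k - 1) 25 = pvRep k := by
  have h : (26 : Int) ^ k - 1 = 25 * pvRep k := by rw [← pvRep_mul k]; ring
  rw [h, PySem.Int.floordiv_eq_ediv_of_pos (by norm_num)]
  exact Int.mul_ediv_cancel_left _ (by norm_num)

-- A's enumerated reversed-powers loop computes B's base-26 parse plus the repunit.
theorem pvColA_eq (l : List Char) :
    (PySem.List.enumerate (PySem.Chars.upper l).reverse).foldl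
        (fun (col : Int) (ic : Int × Char) =>
          col + ((ic.2.toNat : Int) - 65 + 1) * 26 ^ ic.1.toNat) 0
      = l.foldl (fun (a : Int) c =>
          a * 26 + (((PySem.Chars.upperChar c).toNat : Int) - 65)) 0
        + PySem.Int.floordiv (26 ^ l.length - 1) 25 := by
  have hu : PySem.Chars.upper l = l.map PySem.Chars.upperChar := rfl
  have h0 : (0 : Int) = ((0 : Nat) : Int) := rfl
  rw [pvHorner (fun c => ((PySem.Chars.upperChar c).toNat : Int) - 65), hu,
      ← List.map_reverse, h0,
      pvEnumFold (fun c => ((c.toNat : Int) - 65 + 1)) _ 0 (((0 : Nat) : Int)),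
      pvSumPow_map, pvRep_floordiv]
  have := pvSumPow_shift (fun c => ((PySem.Chars.upperChar c).toNat : Int) - 65) l.reverse 0
  simp only [List.length_reverse] at this
  simpa using this

-- ===== VERDICT (by name: the statement is the Claim_ definition above) =====
theorem a1_to_grid_range_py_spec : Claim_equal_a1_to_grid_range_py := by
  intro s _ _
  unfold Spec_a1_to_grid_range_py a1_to_grid_range_py a1_to_grid_range_py_alt
  simp only [pvSplit_eq, List.nil_append]
  have h := pvColA_eq (s.toList.filter (fun c => PySem.Chars.isalpha c))
  exact Prod.ext (by rw [h]) rfl
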